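-- pv_equiv track=rewrite | github.com/TourTerrible/Circuit-X | Final/final.py | count_gate_n_type
-- ===== SOURCE A (Python) =====
-- def count_gate_n_type(array_2d_final):
--     #count=[not,and,or,xnor,xor,nor,nand]
--     count_gate=[0,0,0,0,0,0,0]
--     for a in array_2d_final:
--         if(a[4]==0):
--             count_gate[0]=count_gate[0]+1
--         if(a[4]==1):
--             count_gate[1]=count_gate[1]+1
--         if(a[4]==2):
--             count_gate[2]=count_gate[2]+1
--         if(a[4]==3):
--             count_gate[3]=count_gate[3]+1
--         if(a[4]==4):
--             count_gate[4]=count_gate[4]+1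
--         if(a[4]==5):
--             count_gate[5]=count_gate[5]+1
--         if(a[4]==6):
--             count_gate[6]=count_gate[6]+1
--
--     return(count_gate)
-- ===== SOURCE B (Python) =====
-- def count_gate_n_type(array_2d_final):
--     codes = [a[4] for a in array_2d_final]
--     return [codes.count(i) for i in range(7)]
-- ===== Notes on version B (the rewrite author's own statement) =====
-- stated objective: simpler
-- what changed: Replaces the single pass with seven manual if-branches updating a mutable 7-slot list by extracting the gate codes once and projecting [codes.count(i) for i in range(7)]; out-of-range codes are ignored in both.
import Mathlib
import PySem

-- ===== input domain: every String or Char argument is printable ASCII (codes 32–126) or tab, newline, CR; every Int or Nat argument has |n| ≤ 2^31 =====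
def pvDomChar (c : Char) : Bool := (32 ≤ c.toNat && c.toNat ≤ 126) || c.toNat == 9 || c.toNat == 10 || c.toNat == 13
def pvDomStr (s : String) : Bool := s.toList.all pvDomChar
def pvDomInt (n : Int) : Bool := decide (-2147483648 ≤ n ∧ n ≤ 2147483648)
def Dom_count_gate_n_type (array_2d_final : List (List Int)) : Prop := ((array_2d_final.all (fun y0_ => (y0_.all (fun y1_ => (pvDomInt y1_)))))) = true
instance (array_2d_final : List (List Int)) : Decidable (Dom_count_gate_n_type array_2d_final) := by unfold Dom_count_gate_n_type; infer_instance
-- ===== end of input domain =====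

-- B replaces A's seven if-branches over a mutable 7-slot list by one code extraction plus a count projection (objective: simpler).

-- ===== PORT A =====
-- loop body of A: the seven independent 'if a[4]==k: count_gate[k]+=1' updates
-- (a[4] is PySem.List.pyGetD a 4 0 — exact under Pre_, which guarantees the index is in range)
def gateStep (cg : List Int) (a : List Int) : List Int :=
  let v := PySem.List.pyGetD a 4 0
  let cg := if v = 0 then PySem.List.pySetD cg 0 (PySem.List.pyGetD cg 0 0 + 1) else cg
  let cg := if v = 1 then PySem.List.pySetD cg 1 (PySem.List.pyGetD cg 1 0 + 1) else cg
  let cg := if v = 2 then PySem.List.pySetD cg 2 (PySem.List.pyGetD cg 2 0 + 1) else cg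
  let cg := if v = 3 then PySem.List.pySetD cg 3 (PySem.List.pyGetD cg 3 0 + 1) else cg
  let cg := if v = 4 then PySem.List.pySetD cg 4 (PySem.List.pyGetD cg 4 0 + 1) else cg
  let cg := if v = 5 then PySem.List.pySetD cg 5 (PySem.List.pyGetD cg 5 0 + 1) else cg
  let cg := if v = 6 then PySem.List.pySetD cg 6 (PySem.List.pyGetD cg 6 0 + 1) else cg
  cg

def count_gate_n_type (array_2d_final : List (List Int)) : List Int :=
  array_2d_final.foldl gateStep [0, 0, 0, 0, 0, 0, 0]

-- ===== PORT B =====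
def count_gate_n_type_alt (array_2d_final : List (List Int)) : List Int :=
  let codes := array_2d_final.map (fun a => PySem.List.pyGetD a 4 0)
  (PySem.List.pyRange 0 7 1).map (fun i => (PySem.List.count codes i : Int))

-- ===== PRECONDITION & SPEC =====
-- Pre_ excludes exactly the inputs where Python's a[4] raises IndexError (a row shorter than 5).
def Pre_count_gate_n_type (array_2d_final : List (List Int)) : Prop :=
  ∀ a ∈ array_2d_final, 5 ≤ a.length
instance (array_2d_final : List (List Int)) : Decidable (Pre_count_gate_n_type array_2d_final) := by
  unfold Pre_count_gate_n_type; infer_instance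
def pvWitness_count_gate_n_type : List (List Int) := [[1, 2, 3, 4, 0], [9, 9, 9, 9, 6], [0, 0, 0, 0, 2]]

def Spec_count_gate_n_type (array_2d_final : List (List Int)) (out : List Int) : Prop := out = count_gate_n_type_alt array_2d_final
instance (array_2d_final : List (List Int)) (out : List Int) : Decidable (Spec_count_gate_n_type array_2d_final out) := by unfold Spec_count_gate_n_type; infer_instance

-- ===== CLAIM (what is proved, stated in full; the proofs are below) =====
def Claim_equal_count_gate_n_type : Prop := ∀ (array_2d_final : List (List Int)), Dom_count_gate_n_type array_2d_final → Pre_count_gate_n_type array_2d_final → Spec_count_gate_n_type array_2d_final (count_gate_n_type array_2d_final)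

-- ===== LEMMAS AND PROOFS =====
lemma gateStep_explicit (s0 s1 s2 s3 s4 s5 s6 : Int) (a : List Int) :
    gateStep [s0, s1, s2, s3, s4, s5, s6] a =
      [s0 + if PySem.List.pyGetD a 4 0 = 0 then 1 else 0,
       s1 + if PySem.List.pyGetD a 4 0 = 1 then 1 else 0,
       s2 + if PySem.List.pyGetD a 4 0 = 2 then 1 else 0,
       s3 + if PySem.List.pyGetD a 4 0 = 3 then 1 else 0,
       s4 + if PySem.List.pyGetD a 4 0 = 4 then 1 else 0,
       s5 + if PySem.List.pyGetD a 4 0 = 5 then 1 else 0,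
       s6 + if PySem.List.pyGetD a 4 0 = 6 then 1 else 0] := by
  simp only [gateStep]
  generalize PySem.List.pyGetD a 4 0 = v
  by_cases h0 : v = 0
  · simp [h0, PySem.List.pySetD, PySem.List.pySet?, PySem.List.pyGetD, PySem.List.pyGet?, PySem.List.pyIdx?]
  by_cases h1 : v = 1
  · simp [h0, h1, PySem.List.pySetD, PySem.List.pySet?, PySem.List.pyGetD, PySem.List.pyGet?, PySem.List.pyIdx?]
  by_cases h2 : v = 2
  · simp [h0, h1, h2, PySem.List.pySetD, PySem.List.pySet?, PySem.List.pyGetD, PySem.List.pyGet?, PySem.List.pyIdx?]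
  by_cases h3 : v = 3
  · simp [h0, h1, h2, h3, PySem.List.pySetD, PySem.List.pySet?, PySem.List.pyGetD, PySem.List.pyGet?, PySem.List.pyIdx?]
  by_cases h4 : v = 4
  · simp [h0, h1, h2, h3, h4, PySem.List.pySetD, PySem.List.pySet?, PySem.List.pyGetD, PySem.List.pyGet?, PySem.List.pyIdx?]
  by_cases h5 : v = 5
  · simp [h0, h1, h2, h3, h4, h5, PySem.List.pySetD, PySem.List.pySet?, PySem.List.pyGetD, PySem.List.pyGet?, PySem.List.pyIdx?]
  by_cases h6 : v = 6
  · simp [h0, h1, h2, h3, h4, h5, h6, PySem.List.pySetD, PySem.List.pySet?, PySem.List.pyGetD, PySem.List.pyGet?, PySem.List.pyIdx?]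
  simp [h0, h1, h2, h3, h4, h5, h6]

lemma gate_loop (rows : List (List Int)) (s0 s1 s2 s3 s4 s5 s6 : Int) :
    rows.foldl gateStep [s0, s1, s2, s3, s4, s5, s6] =
      [s0 + ((rows.map (fun a => PySem.List.pyGetD a 4 0)).count 0 : Int),
       s1 + ((rows.map (fun a => PySem.List.pyGetD a 4 0)).count 1 : Int),
       s2 + ((rows.map (fun a => PySem.List.pyGetD a 4 0)).count 2 : Int),
       s3 + ((rows.map (fun a => PySem.List.pyGetD a 4 0)).count 3 : Int),
       s4 + ((rows.map (fun a => PySem.List.pyGetD a 4 0)).count 4 : Int),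
       s5 + ((rows.map (fun a => PySem.List.pyGetD a 4 0)).count 5 : Int),
       s6 + ((rows.map (fun a => PySem.List.pyGetD a 4 0)).count 6 : Int)] := by
  induction rows generalizing s0 s1 s2 s3 s4 s5 s6 with
  | nil => simp
  | cons a rows ih =>
    simp only [List.foldl_cons, gateStep_explicit, ih, List.map_cons, List.count_cons]
    refine List.ext_getElem (by simp) ?_
    intro i h1 h2
    have hi : i < 7 := by simpa using h1
    interval_cases i <;> simp <;> split_ifs <;> push_cast <;> omega

-- ===== VERDICT (by name: the statement is the Claim_ definition above) =====
theorem count_gate_n_type_spec : Claim_equal_count_gate_n_type := by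
  intro xs _ _
  unfold Spec_count_gate_n_type count_gate_n_type count_gate_n_type_alt
  rw [gate_loop]
  have hr : PySem.List.pyRange 0 7 1 = [0, 1, 2, 3, 4, 5, 6] := by decide
  rw [hr]
  simp [PySem.List.count_eq]
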